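-- pv_equiv track=rewrite | github.com/Pawan-Bhatt/Leetcode_solution | Number of occurrence - GFG/number-of-occurrence.py | count
-- ===== SOURCE A (Python) =====
-- def count(arr, n, x):
--     count = 0
--     for i in arr:
--         if i==x:
--             count+=1
--         elif i>x:
--             break
--     return count
-- ===== SOURCE B (Python) =====
-- def count(arr, n, x):
--     j = next((i for i, v in enumerate(arr) if v > x), len(arr))
--     return arr[:j].count(x)
-- ===== Notes on version B (the rewrite author's own statement) =====
-- stated objective: alternative
-- what changed: Replaced the single accumulator loop with break by a two-phase decomposition: locate the first element greater than x with next() over an enumerate generator, then count x in that prefix slice with list.count.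
import Mathlib
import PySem

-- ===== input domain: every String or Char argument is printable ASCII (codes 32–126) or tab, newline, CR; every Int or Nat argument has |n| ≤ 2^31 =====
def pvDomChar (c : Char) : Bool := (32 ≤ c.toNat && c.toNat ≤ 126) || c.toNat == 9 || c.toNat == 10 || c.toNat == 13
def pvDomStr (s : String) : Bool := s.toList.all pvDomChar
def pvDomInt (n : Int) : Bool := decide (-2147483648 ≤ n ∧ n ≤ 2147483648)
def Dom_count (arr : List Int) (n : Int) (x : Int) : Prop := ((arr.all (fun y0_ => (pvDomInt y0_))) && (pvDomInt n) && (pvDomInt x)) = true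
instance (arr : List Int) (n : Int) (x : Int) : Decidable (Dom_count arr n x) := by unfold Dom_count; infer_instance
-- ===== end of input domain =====

-- B replaces A's accumulator loop with break by find-cutoff-then-count-in-prefix; same O(n), return value identical.

-- ===== PORT A =====
-- the for-loop with break, accumulator c = count
def countLoop (l : List Int) (x : Int) (c : Int) : Int :=
  match l with
  | [] => c
  | i :: t => if i == x then countLoop t x (c + 1) else if i > x then c else countLoop t x c

def count (arr : List Int) (n : Int) (x : Int) : Int := countLoop arr x 0

-- ===== PORT B =====
-- next((i for i, v in enumerate(arr) if v > x), len(arr))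
def firstGtIdx (l : List Int) (x : Int) : Nat :=
  match l with
  | [] => 0
  | v :: t => if v > x then 0 else firstGtIdx t x + 1

def count_alt (arr : List Int) (n : Int) (x : Int) : Int :=
  ((PySem.List.slice arr none (some ((firstGtIdx arr x : Nat) : Int))).count x : Int)

-- ===== PRECONDITION & SPEC =====
def Spec_count (arr : List Int) (n : Int) (x : Int) (out : Int) : Prop := out = count_alt arr n x
instance (arr : List Int) (n : Int) (x : Int) (out : Int) : Decidable (Spec_count arr n x out) := by unfold Spec_count; infer_instance

-- ===== CLAIM (what is proved, stated in full; the proofs are below) =====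
def Claim_equal_count : Prop := ∀ (arr : List Int) (n : Int) (x : Int), Dom_count arr n x → Spec_count arr n x (count arr n x)

-- ===== LEMMAS AND PROOFS =====
theorem countLoop_eq (l : List Int) (x : Int) (c : Int) :
    countLoop l x c = c + ((l.take (firstGtIdx l x)).count x : Int) := by
  induction l generalizing c with
  | nil => simp [countLoop, firstGtIdx]
  | cons i t ih =>
    by_cases hx : i = x
    · subst hx
      have hgt : ¬ i > i := lt_irrefl i
      simp [countLoop, firstGtIdx, ih, List.take_succ_cons, List.count_cons]
      ring
    · by_cases hgt : i > x
      · simp [countLoop, firstGtIdx, hx, hgt]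
      · simp [countLoop, firstGtIdx, hx, hgt, ih, List.take_succ_cons, List.count_cons]

-- ===== VERDICT (by name: the statement is the Claim_ definition above) =====
theorem count_spec : Claim_equal_count := by
  intro arr n x _
  unfold Spec_count count count_alt
  rw [PySem.List.slice_to_natCast, countLoop_eq]
  simp
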